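-- pv_equiv track=rewrite | github.com/plan-bug/LeetCode-Challenge | microcephalus7/medium/1529.py | minFlips
-- ===== SOURCE A (Python) =====
-- def minFlips(target: str) -> int:
--     res = 0
--     status = "0"
--
--     for i in target:
--         if i != status:
--             res += 1
--             status = i
--     return res
-- ===== SOURCE B (Python) =====
-- def minFlips(target: str) -> int:
--     # Count maximal runs of equal characters by repeatedly stripping the
--     # leading run with lstrip; the leading virtual '0' absorbs the first
--     # run's flip when the string starts with '0'.
--     runs = 0
--     rest = target
--     while rest:
--         rest = rest.lstrip(rest[0])
--         runs += 1
--     return runs - 1 if target.startswith('0') else runs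
-- ===== Notes on version B (the rewrite author's own statement) =====
-- stated objective: alternative
-- what changed: Replaces A's char-by-char scan with a running status flag by a grouping strategy: repeatedly consume the whole leading maximal run with lstrip, count the runs, and subtract one when the first character equals the initial all-off bulb state (the virtual leading zero absorbs the first run's flip).
import Mathlib
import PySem

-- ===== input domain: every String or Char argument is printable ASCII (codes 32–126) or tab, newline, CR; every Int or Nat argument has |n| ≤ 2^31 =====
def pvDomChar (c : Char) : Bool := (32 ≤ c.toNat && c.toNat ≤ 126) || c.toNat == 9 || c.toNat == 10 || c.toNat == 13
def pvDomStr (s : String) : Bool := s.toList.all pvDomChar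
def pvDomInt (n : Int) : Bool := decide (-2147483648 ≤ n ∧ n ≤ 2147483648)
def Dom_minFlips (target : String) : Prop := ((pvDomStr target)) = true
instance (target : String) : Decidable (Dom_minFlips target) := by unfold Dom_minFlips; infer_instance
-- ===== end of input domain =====

-- B replaces A's stateful running-status scan by grouping: strip off maximal runs one at a
-- time, count them, and correct for a leading '0'; objective: alternative (same result, not faster).

-- ===== PORT A =====
-- literal port of A: loop over the characters with state (res, status), status initialised to '0'
def minFlips (target : String) : Int :=
  (target.toList.foldl
    (fun (st : Int × Char) (i : Char) =>
      if i ≠ st.2 then (st.1 + 1, i) else st) (0, '0')).1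

-- ===== PORT B =====
-- port of Source B's while loop: rest.lstrip(rest[0]) with a one-char argument is exactly
-- List.dropWhile (· == first char); one loop iteration per maximal run.
def pvRuns : List Char → Int
  | [] => 0
  | c :: cs => 1 + pvRuns (cs.dropWhile (· == c))
termination_by l => l.length
decreasing_by
  exact Nat.lt_succ_of_le (List.length_dropWhile_le _ _)

def minFlips_alt (target : String) : Int :=
  let runs := pvRuns target.toList
  -- target.startswith('0')
  match target.toList with
  | '0' :: _ => runs - 1
  | _ => runs

-- ===== PRECONDITION & SPEC =====
def Spec_minFlips (target : String) (out : Int) : Prop := out = minFlips_alt target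
instance (target : String) (out : Int) : Decidable (Spec_minFlips target out) := by unfold Spec_minFlips; infer_instance

-- ===== CLAIM (what is proved, stated in full; the proofs are below) =====
def Claim_equal_minFlips : Prop := ∀ (target : String), Dom_minFlips target → Spec_minFlips target (minFlips target)

-- ===== LEMMAS AND PROOFS =====

theorem pvRuns_nil : pvRuns [] = 0 := by
  rw [pvRuns]

theorem pvRuns_cons (c : Char) (cs : List Char) :
    pvRuns (c :: cs) = 1 + pvRuns (cs.dropWhile (· == c)) := by
  rw [pvRuns]

-- A's fold from state (res, s) yields res plus the number of runs of l after the
-- leading run of characters equal to the status s has been absorbed.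
theorem pvFold_eq : ∀ (l : List Char) (res : Int) (s : Char),
    ((l.foldl (fun (st : Int × Char) (i : Char) =>
      if i ≠ st.2 then (st.1 + 1, i) else st) (res, s)).1)
      = res + pvRuns (l.dropWhile (· == s)) := by
  intro l
  induction l with
  | nil => intro res s; simp [pvRuns_nil]
  | cons c cs ih =>
    intro res s
    rw [List.foldl_cons]
    by_cases h : c = s
    · subst h
      rw [if_neg (by simp), ih, List.dropWhile_cons_of_pos (by simp)]
    · rw [if_pos h, ih, List.dropWhile_cons_of_neg (by simp [h]), pvRuns_cons]
      omega

theorem pvMain (l : List Char) :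
    (0 : Int) + pvRuns (l.dropWhile (· == '0'))
      = (match l with
         | '0' :: _ => pvRuns l - 1
         | _ => pvRuns l) := by
  match l with
  | [] => simp
  | c :: cs =>
    by_cases hc : c = '0'
    · subst hc
      show (0 : Int) + pvRuns (cs.dropWhile (· == '0')) = pvRuns ('0' :: cs) - 1
      rw [pvRuns_cons]
      omega
    · rw [List.dropWhile_cons_of_neg (by simp [hc])]
      have : (match c :: cs with
              | '0' :: _ => pvRuns (c :: cs) - 1
              | _ => pvRuns (c :: cs)) = pvRuns (c :: cs) := by
        split
        · rename_i heq
          cases heq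
          exact absurd rfl hc
        · rfl
      rw [this]
      omega

-- ===== VERDICT (by name: the statement is the Claim_ definition above) =====
theorem minFlips_spec : Claim_equal_minFlips := by
  intro target _
  unfold Spec_minFlips minFlips minFlips_alt
  rw [pvFold_eq]
  exact pvMain target.toList
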